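-- pv_equiv track=rewrite | github.com/AbhiramAroop/Algorithms | Graph_theory/Trie.py | strings_pos_wildcard
-- ===== SOURCE A (Python) =====
-- def strings_pos_wildcard(query_str):
--     """
--     This function splits a given string containing lower case alphabets and one '?'. It splits the
--     string appearing before and after the '?' and returns them as a Tuple of two lists.
--
--     @param: query_str, a non-empty string of lower case alphabets with one '?'
--     @return: An Tuple of two Lists of strings
--     @complexity: best and worst case: O(q), where q is the length of the input string
--     """
--
--     prefix = []
--     suffix = []
--
--
--     prefix_status = True #Used to keep track the position of character relative to the wildcard
--
--     #Sepratates the query_str into two parts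
--     for i in range(0,len(query_str)):
--         #Strings before '?' in query_str
--         if query_str[i] != '?' and prefix_status == True:
--             prefix.append(query_str[i])
--         elif query_str[i] == '?':
--             prefix_status = False
--         #Strings after '?' in query_str
--         else:
--             suffix.append(query_str[i])
--
--
--     return prefix,suffix
-- ===== SOURCE B (Python) =====
-- def strings_pos_wildcard(query_str):
--     i = query_str.find('?')
--     if i == -1:
--         return list(query_str), []
--     return list(query_str[:i]), [c for c in query_str[i + 1:] if c != '?']
-- ===== Notes on version B (the rewrite author's own statement) =====
-- stated objective: alternative
-- what changed: Replaces the per-character boolean state machine with: locate the first wildcard via str.find, slice the prefix off before it, and filter the remaining wildcards out of the suffix slice.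
import Mathlib
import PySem

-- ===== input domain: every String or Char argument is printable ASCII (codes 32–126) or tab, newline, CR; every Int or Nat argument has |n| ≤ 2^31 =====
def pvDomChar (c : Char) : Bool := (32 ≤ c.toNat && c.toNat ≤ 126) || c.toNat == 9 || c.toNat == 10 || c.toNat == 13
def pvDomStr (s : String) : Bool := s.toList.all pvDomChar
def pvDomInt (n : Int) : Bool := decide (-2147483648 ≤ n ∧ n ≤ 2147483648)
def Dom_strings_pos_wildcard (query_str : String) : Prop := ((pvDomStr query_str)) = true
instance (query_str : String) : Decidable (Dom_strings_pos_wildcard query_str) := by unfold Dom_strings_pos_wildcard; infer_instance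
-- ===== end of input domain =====

-- B replaces A's per-character boolean state machine by "find the first '?', slice around it"
-- (same O(q) cost, different decomposition); return value only, neither version mutates anything.

def pvOne (c : Char) : String := String.ofList [c]

-- Bool predicate "c != '?'" (the comprehension's condition in B)
def pvNotQ (c : Char) : Bool := c ≠ '?'

-- ===== PORT A =====
-- the for-loop of A with its state (prefix, suffix, prefix_status), branches in A's order
def pvGoA : List Char → List String → List String → Bool → List String × List String
  | [], prefixAcc, suffixAcc, _ => (prefixAcc, suffixAcc)
  | c :: rest, prefixAcc, suffixAcc, st =>
    if c ≠ '?' ∧ st = true then pvGoA rest (prefixAcc ++ [pvOne c]) suffixAcc st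
    else if c = '?' then pvGoA rest prefixAcc suffixAcc false
    else pvGoA rest prefixAcc (suffixAcc ++ [pvOne c]) st

def strings_pos_wildcard (query_str : String) : List String × List String :=
  pvGoA query_str.toList [] [] true

-- ===== PORT B =====
def strings_pos_wildcard_alt (query_str : String) : List String × List String :=
  let cs := query_str.toList
  let i := PySem.Chars.find cs ['?']
  if i = -1 then (cs.map pvOne, [])
  else ((PySem.List.slice cs none (some i)).map pvOne,
        ((PySem.List.slice cs (some (i + 1)) none).filter pvNotQ).map pvOne)

-- ===== PRECONDITION & SPEC =====
def Spec_strings_pos_wildcard (query_str : String) (out : List String × List String) : Prop := out = strings_pos_wildcard_alt query_str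
instance (query_str : String) (out : List String × List String) : Decidable (Spec_strings_pos_wildcard query_str out) := by unfold Spec_strings_pos_wildcard; infer_instance

-- ===== CLAIM (what is proved, stated in full; the proofs are below) =====
def Claim_equal_strings_pos_wildcard : Prop := ∀ (query_str : String), Dom_strings_pos_wildcard query_str → Spec_strings_pos_wildcard query_str (strings_pos_wildcard query_str)

-- ===== LEMMAS AND PROOFS =====

theorem pvNotQ_eq_true_iff (c : Char) : pvNotQ c = true ↔ c ≠ '?' := by
  simp [pvNotQ]

-- once the status is false, every non-'?' char goes to the suffix, '?' is dropped
theorem pvGoA_false (cs : List Char) : ∀ (p s : List String),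
    pvGoA cs p s false = (p, s ++ (cs.filter pvNotQ).map pvOne) := by
  induction cs with
  | nil => intro p s; simp [pvGoA]
  | cons c rest ih =>
    intro c_p c_s
    by_cases hc : c = '?'
    · subst hc; simp [pvGoA, ih, pvNotQ]
    · simp [pvGoA, ih, pvNotQ_eq_true_iff, hc]

-- in the true phase: prefix collects chars up to the first '?', suffix the '?'-filtered remainder
theorem pvGoA_true (cs : List Char) : ∀ (p s : List String),
    pvGoA cs p s true =
      (p ++ (cs.takeWhile pvNotQ).map pvOne,
       s ++ (((cs.dropWhile pvNotQ).drop 1).filter pvNotQ).map pvOne) := by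
  induction cs with
  | nil => intro p s; simp [pvGoA]
  | cons c rest ih =>
    intro p s
    by_cases hc : c = '?'
    · subst hc
      have hq : pvNotQ '?' = false := by simp [pvNotQ]
      simp [pvGoA, pvGoA_false, List.takeWhile, List.dropWhile, hq]
    · have hq : pvNotQ c = true := by simp [pvNotQ, hc]
      simp [pvGoA, hc, ih, List.takeWhile, List.dropWhile, hq]

-- takeWhile/dropWhile at the first position where ['?'] is a prefix of the drop
theorem pv_tw (cs : List Char) : ∀ (k : Nat),
    (∀ j < k, ¬ ['?'] <+: cs.drop j) → ['?'] <+: cs.drop k →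
    cs.takeWhile pvNotQ = cs.take k ∧ cs.dropWhile pvNotQ = cs.drop k := by
  induction cs with
  | nil => intro k _ hk; simp at hk
  | cons c rest ih =>
    intro k hlt hk
    cases k with
    | zero =>
      obtain ⟨t, ht⟩ := hk
      have hc : c = '?' := by
        have : '?' :: t = c :: rest := ht
        exact (List.cons.injEq _ _ _ _ ▸ this :
          '?' = c ∧ t = rest).1.symm
      subst hc
      have hq : pvNotQ '?' = false := by simp [pvNotQ]
      simp [List.takeWhile, List.dropWhile, hq]
    | succ k =>
      have hc : c ≠ '?' := by
        intro h
        exact hlt 0 (Nat.succ_pos _) ⟨rest, by simp [h]⟩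
      have hlt' : ∀ j < k, ¬ ['?'] <+: rest.drop j := by
        intro j hj
        have := hlt (j + 1) (by omega)
        simpa using this
      have hk' : ['?'] <+: rest.drop k := by simpa using hk
      obtain ⟨h1, h2⟩ := ih k hlt' hk'
      have hq : pvNotQ c = true := by simp [pvNotQ, hc]
      constructor
      · simp [List.takeWhile, hq, h1]
      · simp [List.dropWhile, hq, h2]

-- no '?' anywhere: takeWhile is everything, dropWhile empty
theorem pv_no_q (cs : List Char) (h : '?' ∉ cs) :
    cs.takeWhile pvNotQ = cs ∧ cs.dropWhile pvNotQ = [] := by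
  constructor
  · apply List.takeWhile_eq_self_iff.mpr
    intro x hx
    simp [pvNotQ]
    intro he; exact h (he ▸ hx)
  · apply List.dropWhile_eq_nil_iff.mpr
    intro x hx
    simp [pvNotQ]
    intro he; exact h (he ▸ hx)

theorem pv_singleton_infix_of_mem {a : Char} {cs : List Char} (h : a ∈ cs) : [a] <:+: cs := by
  obtain ⟨l1, l2, rfl⟩ := List.append_of_mem h
  exact ⟨l1, l2, by simp⟩

-- ===== VERDICT (by name: the statement is the Claim_ definition above) =====
theorem strings_pos_wildcard_spec : Claim_equal_strings_pos_wildcard := by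
  intro q _
  show strings_pos_wildcard q = strings_pos_wildcard_alt q
  unfold strings_pos_wildcard strings_pos_wildcard_alt
  set cs := q.toList with hcs
  rw [pvGoA_true]
  by_cases hi : PySem.Chars.find cs ['?'] = -1
  · -- no '?' in the string
    have hnotin : '?' ∉ cs := by
      intro hmem
      exact ((PySem.Chars.find_eq_neg_one_iff cs ['?']).mp hi) (pv_singleton_infix_of_mem hmem)
    obtain ⟨h1, h2⟩ := pv_no_q cs hnotin
    simp only [hi, if_true, h1, h2]
    simp
  · -- '?' present at index k = (find cs ['?']).toNat
    have hnn : 0 ≤ PySem.Chars.find cs ['?'] := by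
      have := PySem.Chars.neg_one_le_find cs ['?']
      omega
    obtain ⟨hpre, hmin⟩ := PySem.Chars.find_spec (s := cs) (sub := ['?']) hnn
    set k := (PySem.Chars.find cs ['?']).toNat with hk
    obtain ⟨h1, h2⟩ := pv_tw cs k (fun j hj => hmin j hj) hpre
    have hik : PySem.Chars.find cs ['?'] = (k : Int) := by omega
    have hs1 : PySem.List.slice cs none (some (PySem.Chars.find cs ['?'])) = cs.take k := by
      rw [hik, PySem.List.slice_to_natCast]
    have hs2 : PySem.List.slice cs (some (PySem.Chars.find cs ['?'] + 1)) none = cs.drop (k + 1) := by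
      rw [hik]
      have : ((k : Int) + 1) = ((k + 1 : Nat) : Int) := by push_cast; ring
      rw [this, PySem.List.slice_from_natCast]
    simp only [hi, if_false, hs1, hs2, h1, h2]
    simp [List.drop_drop]
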